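-- pv_equiv track=rewrite | github.com/stapaw/sequence_alingment | main.py | calculate_best_move_value
-- ===== SOURCE A (Python) =====
-- GAP = "-"
--
-- LEFT = "l"
--
-- UP = "u"
--
-- UP_LEFT = "c"
--
-- def score(x,y, match = 1, mismatch = -1, gap = -2):
--     if x == GAP or y == GAP:
--         return gap
--     elif x == y:
--         return match
--     else:
--         return mismatch
--
-- def possible_moves(i, j):
--     possibilities = [(0, -1, LEFT), (-1, -1, UP_LEFT), (-1, 0, UP)]
--     moves = []
--     for move in possibilities:
--         if (i + move[0]) >= 0 and (j + move[1] >=0):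
--             moves.append(move)
--     return moves
--
-- def calculate_best_move_value(i, j, alignment_array,s1="CAAGAC", s2="GAAC"):
--     moves = possible_moves(i, j)
--     scores = []
--     for move in moves:
--         if move[2] == LEFT:
--             scores.append((score(s1[j + move[1]], GAP), LEFT))
--         if move[2] == UP_LEFT:
--             scores.append((score(s1[j + move[1]], s2[i + move[0]]), UP_LEFT))
--         if move[2] == UP:
--             scores.append((score(s2[i + move[0]], GAP), UP))
--
--     values = [alignment_array[i + move[0]][j + move[1]] + scores[it][0] for it, move in enumerate(moves)]
--     best = (max(values), moves[values.index(max(values))][2])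
--     return best
-- ===== SOURCE B (Python) =====
-- GAP = "-"
-- LEFT = "l"
-- UP = "u"
-- UP_LEFT = "c"
--
--
-- def calculate_best_move_value(i, j, alignment_array, s1="CAAGAC", s2="GAAC"):
--     # Closed-form case analysis on the cell's position: no move list, no loop.
--     if i > 0 and j > 0:
--         x, y = s1[j - 1], s2[i - 1]
--         diag = -2 if (x == GAP or y == GAP) else (1 if x == y else -1)
--         l = alignment_array[i][j - 1] - 2
--         c = alignment_array[i - 1][j - 1] + diag
--         u = alignment_array[i - 1][j] - 2
--         if l >= c and l >= u:
--             return (l, LEFT)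
--         if c >= u:
--             return (c, UP_LEFT)
--         return (u, UP)
--     if j > 0:
--         return (alignment_array[i][j - 1] - 2, LEFT)
--     return (alignment_array[i - 1][j] - 2, UP)
-- ===== Notes on version B (the rewrite author's own statement) =====
-- stated objective: simpler
-- what changed: Replaced A's generic move-list machinery (possible_moves builder, scores list, values comprehension, max() plus values.index() rescans) with a closed-form case analysis on the cell position: three region branches (interior / top row / left column) that name the left/diagonal/up candidates directly and pick the best with two explicit comparisons that preserve A's first-occurrence tie-breaking (l over c over u).
import Mathlib
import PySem

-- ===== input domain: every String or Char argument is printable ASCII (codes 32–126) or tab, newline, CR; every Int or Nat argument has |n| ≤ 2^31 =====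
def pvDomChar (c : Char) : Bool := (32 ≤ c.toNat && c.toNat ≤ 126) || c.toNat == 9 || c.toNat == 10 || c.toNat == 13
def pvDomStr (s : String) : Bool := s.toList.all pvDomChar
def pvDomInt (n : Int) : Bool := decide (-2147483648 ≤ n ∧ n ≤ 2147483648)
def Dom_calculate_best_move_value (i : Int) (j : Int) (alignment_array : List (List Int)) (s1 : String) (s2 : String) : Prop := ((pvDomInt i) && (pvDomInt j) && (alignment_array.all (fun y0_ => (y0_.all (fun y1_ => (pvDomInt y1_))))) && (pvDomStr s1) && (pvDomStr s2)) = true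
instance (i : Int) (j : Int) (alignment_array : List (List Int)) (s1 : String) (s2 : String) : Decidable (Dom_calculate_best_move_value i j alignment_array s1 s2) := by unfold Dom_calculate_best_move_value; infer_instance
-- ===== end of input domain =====

-- B replaces A's move-list/scores-list/max+index pipeline by a closed-form case analysis on the
-- cell position with explicit comparisons preserving A's first-occurrence tie-break; objective: simpler.

-- ===== PORT A =====
def pvScore (x y : Char) : Int :=
  if x = '-' ∨ y = '-' then -2 else if x = y then 1 else -1

def pvPossibleMoves (i j : Int) : List (Int × Int × String) :=
  [((0:Int), (-1:Int), "l"), (-1, -1, "c"), (-1, 0, "u")].foldl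
    (fun moves m => if i + m.1 ≥ 0 ∧ j + m.2.1 ≥ 0 then moves ++ [m] else moves) []

def calculate_best_move_value (i : Int) (j : Int) (alignment_array : List (List Int)) (s1 : String) (s2 : String) : Int × String :=
  let moves := pvPossibleMoves i j
  let scores := moves.foldl (fun scores m =>
    let scores := if m.2.2 = "l" then
        scores ++ [(pvScore ((PySem.Str.pyGet? s1 (j + m.2.1)).getD ' ') '-', "l")] else scores
    let scores := if m.2.2 = "c" then
        scores ++ [(pvScore ((PySem.Str.pyGet? s1 (j + m.2.1)).getD ' ')
                            ((PySem.Str.pyGet? s2 (i + m.1)).getD ' '), "c")] else scores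
    if m.2.2 = "u" then
        scores ++ [(pvScore ((PySem.Str.pyGet? s2 (i + m.1)).getD ' ') '-', "u")] else scores) []
  let values := (PySem.List.enumerate moves 0).map (fun p =>
    PySem.List.pyGetD (PySem.List.pyGetD alignment_array (i + p.2.1) []) (j + p.2.2.1) 0
      + (PySem.List.pyGetD scores p.1 (0, "")).1)
  let mx := (PySem.List.max? values id).getD 0
  ((mx), (PySem.List.pyGetD moves (((PySem.List.index? values mx).getD 0 : Nat) : Int) (0, 0, "")).2.2)

-- ===== PORT B =====
def calculate_best_move_value_alt (i : Int) (j : Int) (alignment_array : List (List Int)) (s1 : String) (s2 : String) : Int × String :=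
  if 0 < i ∧ 0 < j then
    let x := (PySem.Str.pyGet? s1 (j - 1)).getD ' '
    let y := (PySem.Str.pyGet? s2 (i - 1)).getD ' '
    let diag : Int := if x = '-' ∨ y = '-' then -2 else if x = y then 1 else -1
    let l := PySem.List.pyGetD (PySem.List.pyGetD alignment_array i []) (j - 1) 0 - 2
    let c := PySem.List.pyGetD (PySem.List.pyGetD alignment_array (i - 1) []) (j - 1) 0 + diag
    let u := PySem.List.pyGetD (PySem.List.pyGetD alignment_array (i - 1) []) j 0 - 2
    if l ≥ c ∧ l ≥ u then (l, "l")
    else if c ≥ u then (c, "c")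
    else (u, "u")
  else if 0 < j then
    (PySem.List.pyGetD (PySem.List.pyGetD alignment_array i []) (j - 1) 0 - 2, "l")
  else
    (PySem.List.pyGetD (PySem.List.pyGetD alignment_array (i - 1) []) j 0 - 2, "u")

-- ===== PRECONDITION & SPEC =====
-- Pre_ admits exactly the inputs on which the Python A returns: i, j ≥ 0, not both 0
-- (else max([]) raises ValueError), and every index an enabled move touches is in range
-- (else IndexError).
def Pre_calculate_best_move_value (i : Int) (j : Int) (alignment_array : List (List Int)) (s1 : String) (s2 : String) : Prop :=
  0 ≤ i ∧ 0 ≤ j ∧ (1 ≤ i ∨ 1 ≤ j) ∧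
  (1 ≤ j → j ≤ (s1.toList.length : Int) ∧ i < (alignment_array.length : Int) ∧
           j ≤ ((alignment_array.getD i.toNat []).length : Int)) ∧
  (1 ≤ i → i ≤ (s2.toList.length : Int) ∧ i ≤ (alignment_array.length : Int) ∧
           j < ((alignment_array.getD (i - 1).toNat []).length : Int))
instance (i : Int) (j : Int) (alignment_array : List (List Int)) (s1 : String) (s2 : String) : Decidable (Pre_calculate_best_move_value i j alignment_array s1 s2) := by unfold Pre_calculate_best_move_value; infer_instance

def pvWitness_calculate_best_move_value : Int × Int × List (List Int) × String × String :=
  (1, 1, [[0, -1], [2, 3]], "CA", "GA")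

def Spec_calculate_best_move_value (i : Int) (j : Int) (alignment_array : List (List Int)) (s1 : String) (s2 : String) (out : Int × String) : Prop := out = calculate_best_move_value_alt i j alignment_array s1 s2
instance (i : Int) (j : Int) (alignment_array : List (List Int)) (s1 : String) (s2 : String) (out : Int × String) : Decidable (Spec_calculate_best_move_value i j alignment_array s1 s2 out) := by unfold Spec_calculate_best_move_value; infer_instance

-- ===== CLAIM (what is proved, stated in full; the proofs are below) =====
def Claim_equal_calculate_best_move_value : Prop := ∀ (i : Int) (j : Int) (alignment_array : List (List Int)) (s1 : String) (s2 : String), Dom_calculate_best_move_value i j alignment_array s1 s2 → Pre_calculate_best_move_value i j alignment_array s1 s2 → Spec_calculate_best_move_value i j alignment_array s1 s2 (calculate_best_move_value i j alignment_array s1 s2)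

-- ===== LEMMAS AND PROOFS =====

-- ===== VERDICT (by name: the statement is the Claim_ definition above) =====
set_option maxHeartbeats 1000000 in
theorem calculate_best_move_value_spec : Claim_equal_calculate_best_move_value := by
  intro i j arr s1 s2 _ hpre
  obtain ⟨hi, hj, hij, hL, hU⟩ := hpre
  unfold Spec_calculate_best_move_value
  by_cases h1 : 1 ≤ i
  · by_cases h2 : 1 ≤ j
    · by_cases hx : (PySem.List.pyGet? s1.toList (j + -1)).getD ' ' = '-' <;>
      by_cases hy : (PySem.List.pyGet? s2.toList (i + -1)).getD ' ' = '-' <;>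
      by_cases he : (PySem.List.pyGet? s1.toList (j + -1)).getD ' ' =
          (PySem.List.pyGet? s2.toList (i + -1)).getD ' ' <;>
      · simp [calculate_best_move_value, calculate_best_move_value_alt, pvPossibleMoves,
          PySem.List.enumerate, PySem.List.max?, PySem.List.index?, List.idxOf?,
          PySem.Str.pyGet?,
          hi, hj, h1, h2, hx, hy, he, show ¬i < 0 by omega, show ¬j < 0 by omega,
          show ¬i + -1 < 0 by omega, show ¬j + -1 < 0 by omega,
          show (0:Int) < i by omega, show (0:Int) < j by omega,
          show j - 1 = j + -1 by ring, show i - 1 = i + -1 by ring,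
          PySem.List.pyGetD, List.map, List.findIdx?, pvScore,
          List.nil_append, List.cons_append]
        clear hx hy he hij hL hU
        generalize (PySem.List.pyGet? ((PySem.List.pyGet? arr i).getD []) (j + -1)).getD 0 = a
        generalize (PySem.List.pyGet? ((PySem.List.pyGet? arr (i + -1)).getD []) (j + -1)).getD 0 = b
        generalize (PySem.List.pyGet? ((PySem.List.pyGet? arr (i + -1)).getD []) j).getD 0 = c
        split_ifs <;>
          simp [List.findIdx?.go, beq_iff_eq] <;>
          (try split_ifs) <;> (try (simp only [Option.getD_some, not_true] at *)) <;> (try simp) <;> (try omega)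
    · have hj0 : j = 0 := by omega
      subst hj0
      simp [calculate_best_move_value, calculate_best_move_value_alt, pvPossibleMoves,
        PySem.List.enumerate, PySem.List.max?, PySem.List.index?, List.idxOf?, pvScore,
        sub_eq_add_neg, show i + -1 ≥ 0 by omega,
        show i - 1 = i + -1 by ring]
  · have hi0 : i = 0 := by omega
    have h2 : 1 ≤ j := by omega
    subst hi0
    simp [calculate_best_move_value, calculate_best_move_value_alt, pvPossibleMoves,
      PySem.List.enumerate, PySem.List.max?, PySem.List.index?, List.idxOf?, pvScore,
      sub_eq_add_neg, show j + -1 ≥ 0 by omega, show (0:Int) < j by omega,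
      show j - 1 = j + -1 by ring]
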